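-- pv_equiv track=rewrite | github.com/kinnla/listcomprehension | generate_variants.py | variants
-- ===== SOURCE A (Python) =====
-- def variants(tex_doc, n=1):
-- 	""" Generates variants of a tex documents
--
-- 	tex_doc -- the tex document as a string
-- 	n -- the number of variants to be generated (default 1)
-- 	"""
--
-- 	# additional contents for the replacements dictionary
-- 	B = ['-2', '-3', '-4', '+\\frac{1}{2}', '+\\frac{1}{3}', '+\\frac{2}{3}']
-- 	C = ['+\\frac{1}{2}', '+\\frac{1}{3}', '+\\frac{2}{3}', '-\\frac{1}{3}', '-\\frac{2}{3}']
--
-- 	# dictionary of replacements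
-- 	replacements = {
-- 		'(NORMALFORM)': ['x^2' + b + 'x' + c for b in B for c in C],
-- 		'(2A)': [a + "'(x)=" + b for a in 'fgh' for b in ['x^2', '\\sqrt{x}', 'x^3', '-2x', '\\frac{x}{3}']],
-- 		'(2B)': [a + ',' + b + '\\overline{' + c + '}' for a in "01" for b in "789" for c in "23456"],
-- 		'(2C)': [a + '\\in\\mathbb{' + b + '}' for a in "xyabcni" for b in "NRQZ"],
-- 		'(2D)': [a + '\\neq-' + str(b) for a in "xyz" for b in range (1001, 1010)]
-- 	}
--
-- 	# loop n times
-- 	for i in range(n):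
--
-- 		# create a variant of the tex document
-- 		# don't need to clone here, as replace will generate a copy
-- 		variant = tex_doc
--
-- 		# iterate on the replacement keys
-- 		for key in replacements:
--
-- 			# determine the actual replacement, then replace
-- 			l = replacements[key]
-- 			replacement = l[i % len(l)]
-- 			variant = variant.replace(key, replacement)
--
-- 		# yield the generated variant
-- 		yield variant
-- ===== SOURCE B (Python) =====
-- def variants(tex_doc, n=1):
-- 	""" Generates variants of a tex documents
--
-- 	tex_doc -- the tex document as a string
-- 	n -- the number of variants to be generated (default 1)
-- 	"""
--
-- 	# same replacement material, kept unexpanded: each key's i-th image is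
-- 	# computed in closed form by div/mod arithmetic instead of indexing a
-- 	# materialized comprehension product list
-- 	B = ['-2', '-3', '-4', '+\\frac{1}{2}', '+\\frac{1}{3}', '+\\frac{2}{3}']
-- 	C = ['+\\frac{1}{2}', '+\\frac{1}{3}', '+\\frac{2}{3}', '-\\frac{1}{3}', '-\\frac{2}{3}']
-- 	F = ['x^2', '\\sqrt{x}', 'x^3', '-2x', '\\frac{x}{3}']
--
-- 	def value(key, i):
-- 		if key == '(NORMALFORM)':
-- 			j = i % 30
-- 			return 'x^2' + B[j // 5] + 'x' + C[j % 5]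
-- 		if key == '(2A)':
-- 			j = i % 15
-- 			return 'fgh'[j // 5] + "'(x)=" + F[j % 5]
-- 		if key == '(2B)':
-- 			j = i % 30
-- 			return '01'[j // 15] + ',' + '789'[(j % 15) // 5] + '\\overline{' + '23456'[j % 5] + '}'
-- 		if key == '(2C)':
-- 			j = i % 28
-- 			return 'xyabcni'[j // 4] + '\\in\\mathbb{' + 'NRQZ'[j % 4] + '}'
-- 		j = i % 27
-- 		return 'xyz'[j // 9] + '\\neq-' + str(1001 + j % 9)
--
-- 	keys = ['(NORMALFORM)', '(2A)', '(2B)', '(2C)', '(2D)']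
--
-- 	# tokenize the document ONCE, in a single left-to-right pass:
-- 	# (True, key) for a placeholder occurrence, (False, run) for a literal run
-- 	tokens = []
-- 	lit = []
-- 	pos = 0
-- 	while pos < len(tex_doc):
-- 		for key in keys:
-- 			if tex_doc.startswith(key, pos):
-- 				if lit:
-- 					tokens.append((False, ''.join(lit)))
-- 					lit = []
-- 				tokens.append((True, key))
-- 				pos += len(key)
-- 				break
-- 		else:
-- 			lit.append(tex_doc[pos])
-- 			pos += 1
-- 	if lit:
-- 		tokens.append((False, ''.join(lit)))
--
-- 	# render each variant from the token list with the closed-form images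
-- 	for i in range(n):
-- 		images = {key: value(key, i) for key in keys}
-- 		yield ''.join(images[t] if is_key else t for is_key, t in tokens)
-- ===== Notes on version B (the rewrite author's own statement) =====
-- stated objective: alternative
-- what changed: B never materializes the five comprehension product lists (it computes each key's i-th image in closed form by div/mod arithmetic on i), tokenizes the document ONCE into placeholder/literal-run tokens, and renders each variant by joining the tokens' images, instead of A's five sequential whole-document str.replace passes per variant over pre-built lists.
import Mathlib
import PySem

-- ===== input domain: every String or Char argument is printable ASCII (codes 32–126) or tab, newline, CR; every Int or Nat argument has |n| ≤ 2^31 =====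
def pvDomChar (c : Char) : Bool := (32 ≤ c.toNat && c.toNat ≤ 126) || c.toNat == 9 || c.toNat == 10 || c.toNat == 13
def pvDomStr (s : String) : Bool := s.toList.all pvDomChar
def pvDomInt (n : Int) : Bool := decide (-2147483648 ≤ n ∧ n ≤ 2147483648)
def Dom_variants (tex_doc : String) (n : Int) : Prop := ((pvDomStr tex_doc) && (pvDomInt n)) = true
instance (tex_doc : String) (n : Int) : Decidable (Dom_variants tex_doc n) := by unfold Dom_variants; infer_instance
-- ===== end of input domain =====

-- B never builds A's five comprehension product lists: it computes each key's i-th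
-- image in closed form by div/mod arithmetic, tokenizes the document once into
-- placeholder/literal-run tokens, and renders each variant by joining the token
-- images, instead of A's five sequential whole-document replace passes per
-- variant over pre-built lists (objective: alternative).

-- ===== PORT A =====
def pvB : List String := ["-2", "-3", "-4", "+\\frac{1}{2}", "+\\frac{1}{3}", "+\\frac{2}{3}"]
def pvC : List String := ["+\\frac{1}{2}", "+\\frac{1}{3}", "+\\frac{2}{3}", "-\\frac{1}{3}", "-\\frac{2}{3}"]
def pvL1 : List String := pvB.flatMap (fun b => pvC.map (fun c => "x^2" ++ b ++ "x" ++ c))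
def pvL2 : List String := "fgh".toList.flatMap (fun a => (["x^2", "\\sqrt{x}", "x^3", "-2x", "\\frac{x}{3}"]).map (fun b => String.ofList [a] ++ "'(x)=" ++ b))
def pvL3 : List String := "01".toList.flatMap (fun a => "789".toList.flatMap (fun b => "23456".toList.map (fun c => String.ofList [a] ++ "," ++ String.ofList [b] ++ "\\overline{" ++ String.ofList [c] ++ "}")))
def pvL4 : List String := "xyabcni".toList.flatMap (fun a => "NRQZ".toList.map (fun b => String.ofList [a] ++ "\\in\\mathbb{" ++ String.ofList [b] ++ "}"))
def pvL5 : List String := "xyz".toList.flatMap (fun a => (PySem.List.pyRange 1001 1010 1).map (fun b => String.ofList [a] ++ "\\neq-" ++ PySem.Int.toStr b))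
def pvDict : PySem.Dict String (List String) :=
  (((((PySem.Dict.empty.insert "(NORMALFORM)" pvL1).insert "(2A)" pvL2).insert "(2B)" pvL3).insert "(2C)" pvL4).insert "(2D)" pvL5)

-- A: for each i, five sequential whole-document replaces (one per dict key)
def variants (tex_doc : String) (n : Int) : List String :=
  (PySem.List.pyRange 0 n 1).map (fun i =>
    pvDict.keys.foldl (fun variant key =>
      let l := pvDict.getD key []
      let replacement := PySem.List.pyGetD l (PySem.Int.mod i (l.length : Int)) ""
      PySem.Str.replace variant key replacement) tex_doc)

-- ===== PORT B =====
def pvAltB : List String := ["-2", "-3", "-4", "+\\frac{1}{2}", "+\\frac{1}{3}", "+\\frac{2}{3}"]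
def pvAltC : List String := ["+\\frac{1}{2}", "+\\frac{1}{3}", "+\\frac{2}{3}", "-\\frac{1}{3}", "-\\frac{2}{3}"]
def pvAltF : List String := ["x^2", "\\sqrt{x}", "x^3", "-2x", "\\frac{x}{3}"]

-- s[j] for an index Source B keeps in range (the default is never reached)
def pvChr (s : String) (j : Int) : String :=
  String.ofList [PySem.List.pyGetD s.toList j ' ']

-- value(key, i): the image of `key` in variant i, in closed form (Source B's `value`)
def pvValue (key : String) (i : Int) : String :=
  if key = "(NORMALFORM)" then
    let j := PySem.Int.mod i 30
    "x^2" ++ PySem.List.pyGetD pvAltB (PySem.Int.floordiv j 5) "" ++ "x" ++ PySem.List.pyGetD pvAltC (PySem.Int.mod j 5) ""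
  else if key = "(2A)" then
    let j := PySem.Int.mod i 15
    pvChr "fgh" (PySem.Int.floordiv j 5) ++ "'(x)=" ++ PySem.List.pyGetD pvAltF (PySem.Int.mod j 5) ""
  else if key = "(2B)" then
    let j := PySem.Int.mod i 30
    pvChr "01" (PySem.Int.floordiv j 15) ++ "," ++ pvChr "789" (PySem.Int.floordiv (PySem.Int.mod j 15) 5) ++ "\\overline{" ++ pvChr "23456" (PySem.Int.mod j 5) ++ "}"
  else if key = "(2C)" then
    let j := PySem.Int.mod i 28
    pvChr "xyabcni" (PySem.Int.floordiv j 4) ++ "\\in\\mathbb{" ++ pvChr "NRQZ" (PySem.Int.mod j 4) ++ "}"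
  else
    let j := PySem.Int.mod i 27
    pvChr "xyz" (PySem.Int.floordiv j 9) ++ "\\neq-" ++ PySem.Int.toStr (1001 + PySem.Int.mod j 9)

def pvAltKeys : List String := ["(NORMALFORM)", "(2A)", "(2B)", "(2C)", "(2D)"]

-- Source B's tokenizing while loop: single left-to-right pass; `lit` is the current
-- literal run (reversed); fuel = remaining length (totalization of the loop)
def pvTok : Nat → List Char → List Char → List (Bool × String)
  | _, lit, [] => if lit.isEmpty then [] else [(false, String.ofList lit.reverse)]
  | 0, lit, _ :: _ => if lit.isEmpty then [] else [(false, String.ofList lit.reverse)]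
  | fuel+1, lit, c :: t =>
    match pvAltKeys.find? (fun k => PySem.Chars.startswith (c :: t) k.toList) with
    | some k =>
      (if lit.isEmpty then [] else [(false, String.ofList lit.reverse)])
        ++ (true, k) :: pvTok fuel [] ((c :: t).drop k.toList.length)
    | none => pvTok fuel (c :: lit) t

-- B: tokenize once; per variant, build the 5-entry image dict and join
def variants_alt (tex_doc : String) (n : Int) : List String :=
  let tokens := pvTok tex_doc.toList.length [] tex_doc.toList
  (PySem.List.pyRange 0 n 1).map (fun i =>
    let images := pvAltKeys.foldl (fun d k => d.insert k (pvValue k i)) PySem.Dict.empty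
    PySem.Str.join "" (tokens.map (fun tk => if tk.1 then images.getD tk.2 "" else tk.2)))

-- ===== PRECONDITION & SPEC =====
def Spec_variants (tex_doc : String) (n : Int) (out : List String) : Prop := out = variants_alt tex_doc n
instance (tex_doc : String) (n : Int) (out : List String) : Decidable (Spec_variants tex_doc n out) := by unfold Spec_variants; infer_instance

-- ===== CLAIM (what is proved, stated in full; the proofs are below) =====
def Claim_equal_variants : Prop := ∀ (tex_doc : String) (n : Int), Dom_variants tex_doc n → Spec_variants tex_doc n (variants tex_doc n)

-- ===== LEMMAS AND PROOFS =====

-- abbreviations used only by the proofs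
def pvRepF (s : List Char) (pr : List Char × List Char) : List Char := PySem.Chars.replace s pr.1 pr.2

def pvSep (a b : List Char) : Prop := ∀ t, t <:+ a → t ≠ [] → ¬ t <+: b ∧ ¬ b <+: t

def pvSepB (a b : List Char) : Bool :=
  a.tails.all (fun t => t.isEmpty || (!t.isPrefixOf b && !b.isPrefixOf t))

theorem pvSepB_sep {a b : List Char} (h : pvSepB a b = true) : pvSep a b := by
  intro t ht hne
  have := (List.all_eq_true.mp h) t ((List.mem_tails t a).mpr ht)
  rcases Bool.or_eq_true _ _ |>.mp this with h1 | h2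
  · exact absurd (List.isEmpty_iff.mp h1) hne
  · have ⟨u, w⟩ := Bool.and_eq_true _ _ |>.mp h2
    exact ⟨fun hc => by simp [List.isPrefixOf_iff_prefix.mpr hc] at u,
           fun hc => by simp [List.isPrefixOf_iff_prefix.mpr hc] at w⟩

def pvKeysC : List (List Char) := [("(NORMALFORM)").toList, ("(2A)").toList, ("(2B)").toList, ("(2C)").toList, ("(2D)").toList]

def pvCondB (v : List Char) : Bool :=
  !v.isEmpty && pvKeysC.all (fun k => pvSepB v k && pvSepB k v)

def pvCond (v : List Char) : Prop :=
  v ≠ [] ∧ ∀ k ∈ pvKeysC, pvSep v k ∧ pvSep k v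

theorem pvCondB_cond {v : List Char} (h : pvCondB v = true) : pvCond v := by
  have ⟨h1, h2⟩ := Bool.and_eq_true _ _ |>.mp h
  refine ⟨fun hc => by simp [hc] at h1, fun k hk => ?_⟩
  have ⟨u, w⟩ := Bool.and_eq_true _ _ |>.mp (List.all_eq_true.mp h2 k hk)
  exact ⟨pvSepB_sep u, pvSepB_sep w⟩

-- decidable facts about the concrete data
set_option maxHeartbeats 1000000 in
theorem pvMaster1 : ∀ v ∈ pvL1.map String.toList, pvCondB v = true := by decide
set_option maxHeartbeats 1000000 in
theorem pvMaster2 : ∀ v ∈ pvL2.map String.toList, pvCondB v = true := by decide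
set_option maxHeartbeats 1000000 in
theorem pvMaster3 : ∀ v ∈ pvL3.map String.toList, pvCondB v = true := by decide
set_option maxHeartbeats 1000000 in
theorem pvMaster4 : ∀ v ∈ pvL4.map String.toList, pvCondB v = true := by decide
set_option maxHeartbeats 1000000 in
theorem pvMaster5 : ∀ v ∈ pvL5.map String.toList, pvCondB v = true := by decide
set_option maxHeartbeats 1000000 in
theorem pvKeySep : ∀ k ∈ pvKeysC, ∀ k' ∈ pvKeysC, k = k' ∨ (pvSepB k k' = true ∧ pvSepB k' k = true) := by decide
theorem pvKeysDict : pvDict.keys = ["(NORMALFORM)", "(2A)", "(2B)", "(2C)", "(2D)"] := by decide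
theorem pvGetd1 : pvDict.getD "(NORMALFORM)" [] = pvL1 := by decide
theorem pvGetd2 : pvDict.getD "(2A)" [] = pvL2 := by decide
theorem pvGetd3 : pvDict.getD "(2B)" [] = pvL3 := by decide
theorem pvGetd4 : pvDict.getD "(2C)" [] = pvL4 := by decide
theorem pvGetd5 : pvDict.getD "(2D)" [] = pvL5 := by decide

theorem pvGoAcc (old new : List Char) : ∀ (fuel : Nat) (l acc : List Char),
    PySem.Chars.replace.go old new fuel l acc = acc.reverse ++ PySem.Chars.replace.go old new fuel l [] := by
  intro fuel
  induction fuel with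
  | zero => intro l acc; rw [PySem.Chars.replace.go, PySem.Chars.replace.go]; simp
  | succ f ih =>
    intro l acc
    cases l with
    | nil =>
      rw [PySem.Chars.replace.go, PySem.Chars.replace.go] <;> simp
    | cons c t =>
      rw [PySem.Chars.replace.go]
      conv_rhs => rw [PySem.Chars.replace.go]
      by_cases h : old.isPrefixOf (c :: t) = true
      · simp only [h, if_pos]
        rw [ih (List.drop old.length (c :: t)) (new.reverse ++ acc),
            ih (List.drop old.length (c :: t)) (new.reverse ++ [])]
        simp
      · simp only [h, if_neg, Bool.not_eq_true]
        rw [ih t (c :: acc), ih t (c :: [])]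
        simp

theorem pvGoFuel {old : List Char} (new : List Char) (hold : old ≠ []) : ∀ (f1 f2 : Nat) (l : List Char),
    l.length ≤ f1 → l.length ≤ f2 →
    PySem.Chars.replace.go old new f1 l [] = PySem.Chars.replace.go old new f2 l [] := by
  intro f1
  induction f1 with
  | zero =>
    intro f2 l h1 h2
    have : l = [] := List.length_eq_zero_iff.mp (Nat.le_zero.mp h1)
    subst this
    cases f2 <;> simp [PySem.Chars.replace.go.eq_def]
  | succ f ih =>
    intro f2 l h1 h2
    cases l with
    | nil => cases f2 <;> simp [PySem.Chars.replace.go.eq_def]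
    | cons c t =>
      cases f2 with
      | zero => simp at h2
      | succ f2' =>
        rw [PySem.Chars.replace.go]
        conv_rhs => rw [PySem.Chars.replace.go]
        by_cases h : old.isPrefixOf (c :: t) = true
        · simp only [h, if_pos]
          rw [pvGoAcc, pvGoAcc old new f2']
          have hod : 1 ≤ old.length := by
            cases old with | nil => exact absurd rfl hold | cons _ _ => simp
          have hd : (List.drop old.length (c :: t)).length = t.length + 1 - old.length := by simp
          have hct : (c :: t).length = t.length + 1 := by simp
          have hlen : (List.drop old.length (c :: t)).length ≤ f ∧ (List.drop old.length (c :: t)).length ≤ f2' := by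
            constructor <;> omega
          rw [ih f2' _ hlen.1 hlen.2]
        · simp only [h, if_neg, Bool.not_eq_true]
          rw [pvGoAcc, pvGoAcc old new f2']
          have hlen1 : t.length ≤ f := by simp at h1; omega
          have hlen2 : t.length ≤ f2' := by simp at h2; omega
          rw [ih f2' t hlen1 hlen2]

theorem pvReplaceNil {old : List Char} (new : List Char) (hold : old ≠ []) :
    PySem.Chars.replace [] old new = [] := by
  rw [PySem.Chars.replace]
  simp [List.isEmpty_iff, hold]
  rw [PySem.Chars.replace.go.eq_def]
  simp

theorem pvReplaceCons {old : List Char} (new : List Char) {c : Char} {t : List Char} (hold : old ≠ []) :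
    PySem.Chars.replace (c :: t) old new =
      if old.isPrefixOf (c :: t) = true then
        new ++ PySem.Chars.replace (List.drop old.length (c :: t)) old new
      else c :: PySem.Chars.replace t old new := by
  have hd : (List.drop old.length (c :: t)).length ≤ t.length := by
    have : 1 ≤ old.length := by
      cases old with | nil => exact absurd rfl hold | cons _ _ => simp
    simp; omega
  rw [PySem.Chars.replace]
  simp only [List.isEmpty_iff, hold, if_false, List.length_cons]
  rw [PySem.Chars.replace.go.eq_def]
  simp only []
  by_cases h : old.isPrefixOf (c :: t) = true
  · simp only [h, if_pos]
    rw [pvGoAcc]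
    rw [PySem.Chars.replace]
    simp only [List.isEmpty_iff, hold, if_false]
    rw [pvGoFuel new hold t.length (List.drop old.length (c :: t)).length _ hd (le_refl _)]
    simp
  · simp only [h, if_neg, Bool.not_eq_true]
    rw [pvGoAcc]
    rw [PySem.Chars.replace]
    simp only [List.isEmpty_iff, hold, if_false]
    rw [pvGoFuel new hold t.length t.length _ (le_refl _) (le_refl _)]
    simp

theorem pvReplacePos {old : List Char} (new : List Char) {s : List Char} (hold : old ≠ []) (h : old <+: s) :
    PySem.Chars.replace s old new = new ++ PySem.Chars.replace (s.drop old.length) old new := by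
  cases s with
  | nil =>
    have : old = [] := List.prefix_nil.mp h
    exact absurd this hold
  | cons c t =>
    rw [pvReplaceCons new hold]
    simp [List.isPrefixOf_iff_prefix.mpr h]

theorem pvReplaceNeg {old : List Char} (new : List Char) {c : Char} {t : List Char}
    (hold : old ≠ []) (h : ¬ old <+: (c :: t)) :
    PySem.Chars.replace (c :: t) old new = c :: PySem.Chars.replace t old new := by
  rw [pvReplaceCons new hold]
  simp only [List.isPrefixOf_iff_prefix]
  rw [if_neg h]

theorem pvReplacePull {k : List Char} (v : List Char) {p : List Char} (hk : k ≠ []) (hsep : pvSep p k) :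
    ∀ u, PySem.Chars.replace (p ++ u) k v = p ++ PySem.Chars.replace u k v := by
  induction p with
  | nil => intro u; simp
  | cons c p' ih =>
    intro u
    have hnp : ¬ k <+: c :: (p' ++ u) := by
      intro hc
      have h0 := hsep (c :: p') (List.suffix_refl _) (by simp)
      rw [← List.cons_append] at hc
      rcases List.prefix_or_prefix_of_prefix hc (List.prefix_append (c :: p') u) with h | h
      · exact h0.2 h
      · exact h0.1 h
    rw [List.cons_append, pvReplaceNeg v hk hnp]
    rw [ih (fun t ht hne => hsep t (ht.trans (List.suffix_cons c p')) hne) u]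
    rfl

theorem pvPrefixReplace {k v : List Char} (hk : k ≠ []) (hv : v ≠ []) :
    ∀ (x q : List Char), q ≠ [] → pvSep q v → q <+: PySem.Chars.replace x k v → q <+: x := by
  intro x
  induction x with
  | nil => intro q hq hsep h; rw [pvReplaceNil v hk] at h; exact h
  | cons c t ih =>
    intro q hq hsep h
    by_cases hp : k <+: (c :: t)
    · rw [pvReplacePos v hk hp] at h
      have h0 := hsep q (List.suffix_refl _) hq
      rcases List.prefix_or_prefix_of_prefix h (List.prefix_append v _) with h' | h'
      · exact absurd h' h0.1
      · exact absurd h' h0.2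
    · rw [pvReplaceNeg v hk hp] at h
      cases q with
      | nil => exact absurd rfl hq
      | cons d q' =>
        rcases List.cons_prefix_cons.mp h with ⟨rfl, hq'⟩
        cases q' with
        | nil => simp
        | cons e q'' =>
          have : (e :: q'') <+: t :=
            ih (e :: q'') (by simp) (fun s hs hne => hsep s (hs.trans (List.suffix_cons d (e :: q''))) hne) hq'
          exact List.cons_prefix_cons.mpr ⟨rfl, this⟩

theorem pvFoldlNil : ∀ {pairs : List (List Char × List Char)}, (∀ pr ∈ pairs, pr.1 ≠ []) →
    pairs.foldl pvRepF [] = [] := by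
  intro pairs
  induction pairs with
  | nil => intro _; rfl
  | cons pr rest ih =>
    intro h
    simp only [List.foldl_cons, pvRepF, pvReplaceNil pr.2 (h pr (by simp))]
    exact ih (fun q hq => h q (by simp [hq]))

theorem pvFoldlPull : ∀ {pairs : List (List Char × List Char)} {p : List Char},
    (∀ pr ∈ pairs, pr.1 ≠ [] ∧ pvSep p pr.1) →
    ∀ u, pairs.foldl pvRepF (p ++ u) = p ++ pairs.foldl pvRepF u := by
  intro pairs
  induction pairs with
  | nil => intro p _ u; rfl
  | cons pr rest ih =>
    intro p h u
    have h1 := h pr (by simp)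
    simp only [List.foldl_cons, pvRepF]
    rw [pvReplacePull pr.2 h1.1 h1.2 u]
    exact ih (fun q hq => h q (by simp [hq])) _

theorem pvFoldlNomatch : ∀ {pairs : List (List Char × List Char)},
    (∀ pr ∈ pairs, pr.1 ≠ [] ∧ pr.2 ≠ [] ∧ ∀ pr' ∈ pairs, pvSep pr.1 pr'.2) →
    ∀ (c : Char) (t : List Char), (∀ pr ∈ pairs, ¬ pr.1 <+: c :: t) →
      pairs.foldl pvRepF (c :: t) = c :: pairs.foldl pvRepF t := by
  intro pairs
  induction pairs with
  | nil => intro _ c t _; rfl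
  | cons pr rest ih =>
    intro h c t hnm
    have h1 := h pr (by simp)
    simp only [List.foldl_cons, pvRepF]
    rw [pvReplaceNeg pr.2 h1.1 (hnm pr (by simp))]
    have hnm' : ∀ p ∈ rest, ¬ p.1 <+: c :: PySem.Chars.replace t pr.1 pr.2 := by
      intro p hp hc
      have hp1 := (h p (by simp [hp])).1
      cases hq : p.1 with
      | nil => exact hp1 hq
      | cons d q =>
        rw [hq] at hc
        rcases List.cons_prefix_cons.mp hc with ⟨rfl, hq'⟩
        have hsepall := (h p (by simp [hp])).2.2 pr (by simp)
        cases q with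
        | nil => exact hnm p (by simp [hp]) (by rw [hq]; exact List.cons_prefix_cons.mpr ⟨rfl, List.nil_prefix⟩)
        | cons e q'' =>
          have hsepq : pvSep (e :: q'') pr.2 := by
            intro s hs hne
            rw [hq] at hsepall
            exact hsepall s (hs.trans (List.suffix_cons d (e :: q''))) hne
          have := pvPrefixReplace h1.1 h1.2.1 t (e :: q'') (by simp) hsepq hq'
          exact hnm p (by simp [hp]) (by rw [hq]; exact List.cons_prefix_cons.mpr ⟨rfl, this⟩)
    rw [ih (fun p hp => ⟨(h p (by simp [hp])).1, (h p (by simp [hp])).2.1,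
          fun p' hp' => (h p (by simp [hp])).2.2 p' (by simp [hp'])⟩) c _ hnm']

-- ----- the main induction: five sequential replaces = one scan with the same values -----
def pvPairs (v1 v2 v3 v4 v5 : List Char) : List (List Char × List Char) :=
  [(("(NORMALFORM)").toList, v1), (("(2A)").toList, v2), (("(2B)").toList, v3), (("(2C)").toList, v4), (("(2D)").toList, v5)]

theorem pvKeyNe : ∀ k ∈ pvKeysC, k ≠ [] := by decide

theorem pvKeySep' : ∀ k ∈ pvKeysC, ∀ k' ∈ pvKeysC, k ≠ k' → pvSep k k' := by
  intro k hk k' hk' hne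
  rcases pvKeySep k hk k' hk' with h | h
  · exact absurd h hne
  · exact pvSepB_sep h.1

-- one matched key: the whole pair list acts as "emit the value, continue after the key"
theorem pvChainStep {pairs P1 P2 : List (List Char × List Char)} {k v : List Char}
    (hsplit : pairs = P1 ++ (k, v) :: P2) (hkne : k ≠ [])
    (hP1 : ∀ pr ∈ P1, pr.1 ≠ [] ∧ pvSep k pr.1) (hP2 : ∀ pr ∈ P2, pr.1 ≠ [] ∧ pvSep v pr.1) :
    ∀ u, pairs.foldl pvRepF (k ++ u) = v ++ pairs.foldl pvRepF u := by
  subst hsplit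
  intro u
  rw [List.foldl_append, List.foldl_append]
  rw [pvFoldlPull hP1 u]
  simp only [List.foldl_cons]
  have hstep : pvRepF (k ++ P1.foldl pvRepF u) (k, v)
      = v ++ pvRepF (P1.foldl pvRepF u) (k, v) := by
    unfold pvRepF
    rw [pvReplacePos v hkne (List.prefix_append k _)]
    rw [List.drop_left]
  rw [hstep]
  rw [pvFoldlPull hP2]

-- ----- tokenizer lemmas -----
theorem pvAltKeysNonempty : ∀ k ∈ pvAltKeys, k.toList ≠ [] := by decide

theorem pvTokFuel : ∀ (f1 f2 : Nat) (lit s : List Char), s.length ≤ f1 → s.length ≤ f2 →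
    pvTok f1 lit s = pvTok f2 lit s := by
  intro f1
  induction f1 with
  | zero =>
    intro f2 lit s h1 h2
    have : s = [] := List.length_eq_zero_iff.mp (Nat.le_zero.mp h1)
    subst this
    cases f2 <;> rfl
  | succ f ih =>
    intro f2 lit s h1 h2
    cases s with
    | nil => cases f2 <;> rfl
    | cons c t =>
      cases f2 with
      | zero => simp at h2
      | succ f2' =>
        rw [pvTok, pvTok]
        cases hF : pvAltKeys.find? (fun k => PySem.Chars.startswith (c :: t) k.toList) with
        | none =>
          simp only []
          rw [ih f2' (c :: lit) t (by simp at h1; omega) (by simp at h2; omega)]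
        | some k =>
          simp only []
          have hk := List.mem_of_find?_eq_some hF
          have hkn : k.toList ≠ [] := pvAltKeysNonempty k hk
          have hkl : 1 ≤ k.toList.length := by
            cases hx : k.toList with
            | nil => exact absurd hx hkn
            | cons _ _ => simp [hx]
          have hdl : (List.drop k.toList.length (c :: t)).length = t.length + 1 - k.toList.length := by
            simp
          simp only [List.length_cons] at h1 h2
          rw [ih f2' [] _ (by omega) (by omega)]

theorem pvTokKeys : ∀ (fuel : Nat) (lit s : List Char), ∀ tk ∈ pvTok fuel lit s, tk.1 = true → tk.2 ∈ pvAltKeys := by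
  intro fuel
  induction fuel with
  | zero =>
    intro lit s tk htk h
    cases s <;> rw [pvTok] at htk <;> split at htk <;> simp at htk <;> simp [htk] at h
  | succ f ih =>
    intro lit s tk htk h
    cases s with
    | nil =>
      rw [pvTok] at htk; split at htk <;> simp at htk
      simp [htk] at h
    | cons c t =>
      rw [pvTok] at htk
      cases hF : pvAltKeys.find? (fun k => PySem.Chars.startswith (c :: t) k.toList) with
      | none =>
        rw [hF] at htk
        exact ih (c :: lit) t tk htk h
      | some k =>
        rw [hF] at htk
        simp only [List.mem_append, List.mem_cons] at htk
        rcases htk with hflush | hflush | htk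
        · split at hflush <;> simp at hflush
          simp [hflush] at h
        · subst hflush; exact List.mem_of_find?_eq_some hF
        · exact ih [] _ tk htk h

-- flushing an accumulated literal run only prepends its characters to the rendering
theorem pvTokAcc (f : Bool × String → List Char) (hf : ∀ str : String, f (false, str) = str.toList) :
    ∀ (fuel : Nat) (s lit : List Char),
      ((pvTok fuel lit s).map f).flatten = lit.reverse ++ ((pvTok fuel [] s).map f).flatten := by
  intro fuel
  induction fuel with
  | zero =>
    intro s lit
    cases s with
    | nil =>
      rw [pvTok, pvTok]
      cases hl : lit.isEmpty
      · simp [hl, hf]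
      · simp [List.isEmpty_iff.mp hl]
    | cons c t =>
      rw [pvTok, pvTok]
      cases hl : lit.isEmpty
      · simp [hl, hf]
      · simp [List.isEmpty_iff.mp hl]
  | succ f ih =>
    intro s lit
    cases s with
    | nil =>
      rw [pvTok, pvTok]
      cases hl : lit.isEmpty
      · simp [hl, hf]
      · simp [List.isEmpty_iff.mp hl]
    | cons c t =>
      rw [pvTok, pvTok]
      cases hF : pvAltKeys.find? (fun k => PySem.Chars.startswith (c :: t) k.toList) with
      | none =>
        simp only []
        rw [ih t (c :: lit), ih t [c]]
        simp
      | some k =>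
        simp only []
        cases hl : lit.isEmpty
        · simp [hl, hf]
        · simp [List.isEmpty_iff.mp hl]

def pvSel (v1 v2 v3 v4 v5 : List Char) (k : String) : List Char :=
  if k = "(NORMALFORM)" then v1 else if k = "(2A)" then v2 else if k = "(2B)" then v3
  else if k = "(2C)" then v4 else v5

-- the main induction: five sequential replaces = tokenize once, then substitute
theorem pvMain (v1 v2 v3 v4 v5 : List Char)
    (h1 : pvCond v1) (h2 : pvCond v2) (h3 : pvCond v3) (h4 : pvCond v4) (h5 : pvCond v5) :
    ∀ (N : Nat) (s : List Char), s.length ≤ N →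
      (pvPairs v1 v2 v3 v4 v5).foldl pvRepF s
        = ((pvTok s.length [] s).map (fun tk => if tk.1 then pvSel v1 v2 v3 v4 v5 tk.2 else tk.2.toList)).flatten := by
  have hKne : ∀ pr ∈ pvPairs v1 v2 v3 v4 v5, pr.1 ≠ [] := by
    intro pr hpr
    simp only [pvPairs, List.mem_cons, List.not_mem_nil, or_false] at hpr
    rcases hpr with rfl | rfl | rfl | rfl | rfl <;> exact pvKeyNe _ (by simp [pvKeysC])
  have hcv : ∀ pr ∈ pvPairs v1 v2 v3 v4 v5,
      pr.1 ≠ [] ∧ pr.2 ≠ [] ∧ ∀ pr' ∈ pvPairs v1 v2 v3 v4 v5, pvSep pr.1 pr'.2 := by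
    intro pr hpr
    have hval : ∀ pr' ∈ pvPairs v1 v2 v3 v4 v5, ∀ k ∈ pvKeysC, pvSep k pr'.2 := by
      intro pr' hpr' k hk
      simp only [pvPairs, List.mem_cons, List.not_mem_nil, or_false] at hpr'
      rcases hpr' with rfl | rfl | rfl | rfl | rfl
      · exact (h1.2 k hk).2
      · exact (h2.2 k hk).2
      · exact (h3.2 k hk).2
      · exact (h4.2 k hk).2
      · exact (h5.2 k hk).2
    simp only [pvPairs, List.mem_cons, List.not_mem_nil, or_false] at hpr
    rcases hpr with rfl | rfl | rfl | rfl | rfl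
    · exact ⟨pvKeyNe _ (by simp [pvKeysC]), h1.1, fun pr' hpr' => hval pr' hpr' _ (by simp [pvKeysC])⟩
    · exact ⟨pvKeyNe _ (by simp [pvKeysC]), h2.1, fun pr' hpr' => hval pr' hpr' _ (by simp [pvKeysC])⟩
    · exact ⟨pvKeyNe _ (by simp [pvKeysC]), h3.1, fun pr' hpr' => hval pr' hpr' _ (by simp [pvKeysC])⟩
    · exact ⟨pvKeyNe _ (by simp [pvKeysC]), h4.1, fun pr' hpr' => hval pr' hpr' _ (by simp [pvKeysC])⟩
    · exact ⟨pvKeyNe _ (by simp [pvKeysC]), h5.1, fun pr' hpr' => hval pr' hpr' _ (by simp [pvKeysC])⟩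
  intro N
  induction N with
  | zero =>
    intro s hs
    have : s = [] := List.length_eq_zero_iff.mp (Nat.le_zero.mp hs)
    subst this
    rw [pvFoldlNil hKne]
    rfl
  | succ N ih =>
    intro s hs
    cases s with
    | nil => rw [pvFoldlNil hKne]; rfl
    | cons c t =>
      simp only [List.length_cons] at hs
      cases hF : pvAltKeys.find? (fun k => PySem.Chars.startswith (c :: t) k.toList) with
      | none =>
        have hN := List.find?_eq_none.mp hF
        have hnm : ∀ pr ∈ pvPairs v1 v2 v3 v4 v5, ¬ pr.1 <+: c :: t := by
          intro pr hpr hc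
          simp only [pvPairs, List.mem_cons, List.not_mem_nil, or_false] at hpr
          rcases hpr with rfl | rfl | rfl | rfl | rfl
          · exact hN "(NORMALFORM)" (by simp [pvAltKeys]) ((PySem.Chars.startswith_iff _ _).mpr hc)
          · exact hN "(2A)" (by simp [pvAltKeys]) ((PySem.Chars.startswith_iff _ _).mpr hc)
          · exact hN "(2B)" (by simp [pvAltKeys]) ((PySem.Chars.startswith_iff _ _).mpr hc)
          · exact hN "(2C)" (by simp [pvAltKeys]) ((PySem.Chars.startswith_iff _ _).mpr hc)
          · exact hN "(2D)" (by simp [pvAltKeys]) ((PySem.Chars.startswith_iff _ _).mpr hc)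
        rw [pvFoldlNomatch hcv c t hnm]
        rw [ih t (by omega)]
        have htok : pvTok (c :: t).length [] (c :: t) = pvTok t.length [c] t := by
          simp only [List.length_cons]
          rw [pvTok, hF]
        rw [htok]
        rw [pvTokAcc _ (by intro str; simp) t.length t [c]]
        simp
      | some k =>
        have hk := List.mem_of_find?_eq_some hF
        have hsw := List.find?_some hF
        have hpre : k.toList <+: c :: t := (PySem.Chars.startswith_iff _ _).mp hsw
        obtain ⟨u, hu⟩ := hpre
        have hkn : k.toList ≠ [] := pvAltKeysNonempty k hk
        have hkl : 1 ≤ k.toList.length := by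
          cases hx : k.toList with
          | nil => exact absurd hx hkn
          | cons _ _ => simp [hx]
        have hlu : k.toList.length + u.length = t.length + 1 := by
          have := congrArg List.length hu
          simpa using this
        have hulen : u.length ≤ N := by omega
        have hdrop : (c :: t).drop k.toList.length = u := by
          rw [← hu]; exact List.drop_left
        have htok : pvTok (c :: t).length [] (c :: t) = (true, k) :: pvTok u.length [] u := by
          simp only [List.length_cons]
          rw [pvTok, hF]
          simp only [hdrop, List.isEmpty_nil, if_true, List.nil_append, reduceIte]
          rw [pvTokFuel t.length u.length [] u (by omega) (le_refl _)]
        rw [htok, ← hu]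
        simp only [pvAltKeys, List.mem_cons, List.not_mem_nil, or_false] at hk
        rcases hk with rfl | rfl | rfl | rfl | rfl
        · rw [pvChainStep (P1 := []) (P2 := [(("(2A)").toList, v2), (("(2B)").toList, v3), (("(2C)").toList, v4), (("(2D)").toList, v5)])
            (pairs := pvPairs v1 v2 v3 v4 v5) rfl (by decide)
            (by intro pr hpr; simp at hpr)
            (by intro pr hpr
                simp only [List.mem_cons, List.not_mem_nil, or_false] at hpr
                rcases hpr with rfl | rfl | rfl | rfl <;>
                  exact ⟨pvKeyNe _ (by simp [pvKeysC]), (h1.2 _ (by simp [pvKeysC])).1⟩) u]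
          rw [ih u hulen]
          simp [pvSel]
        · rw [pvChainStep (P1 := [(("(NORMALFORM)").toList, v1)])
            (P2 := [(("(2B)").toList, v3), (("(2C)").toList, v4), (("(2D)").toList, v5)])
            (pairs := pvPairs v1 v2 v3 v4 v5) rfl (by decide)
            (by intro pr hpr
                simp only [List.mem_cons, List.not_mem_nil, or_false] at hpr
                rcases hpr with rfl <;>
                  exact ⟨pvKeyNe _ (by simp [pvKeysC]),
                    pvKeySep' _ (by simp [pvKeysC]) _ (by simp [pvKeysC]) (by simp)⟩)
            (by intro pr hpr
                simp only [List.mem_cons, List.not_mem_nil, or_false] at hpr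
                rcases hpr with rfl | rfl | rfl <;>
                  exact ⟨pvKeyNe _ (by simp [pvKeysC]), (h2.2 _ (by simp [pvKeysC])).1⟩) u]
          rw [ih u hulen]
          simp [pvSel]
        · rw [pvChainStep (P1 := [(("(NORMALFORM)").toList, v1), (("(2A)").toList, v2)])
            (P2 := [(("(2C)").toList, v4), (("(2D)").toList, v5)])
            (pairs := pvPairs v1 v2 v3 v4 v5) rfl (by decide)
            (by intro pr hpr
                simp only [List.mem_cons, List.not_mem_nil, or_false] at hpr
                rcases hpr with rfl | rfl <;>
                  exact ⟨pvKeyNe _ (by simp [pvKeysC]),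
                    pvKeySep' _ (by simp [pvKeysC]) _ (by simp [pvKeysC]) (by simp)⟩)
            (by intro pr hpr
                simp only [List.mem_cons, List.not_mem_nil, or_false] at hpr
                rcases hpr with rfl | rfl <;>
                  exact ⟨pvKeyNe _ (by simp [pvKeysC]), (h3.2 _ (by simp [pvKeysC])).1⟩) u]
          rw [ih u hulen]
          simp [pvSel]
        · rw [pvChainStep (P1 := [(("(NORMALFORM)").toList, v1), (("(2A)").toList, v2), (("(2B)").toList, v3)])
            (P2 := [(("(2D)").toList, v5)])
            (pairs := pvPairs v1 v2 v3 v4 v5) rfl (by decide)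
            (by intro pr hpr
                simp only [List.mem_cons, List.not_mem_nil, or_false] at hpr
                rcases hpr with rfl | rfl | rfl <;>
                  exact ⟨pvKeyNe _ (by simp [pvKeysC]),
                    pvKeySep' _ (by simp [pvKeysC]) _ (by simp [pvKeysC]) (by simp)⟩)
            (by intro pr hpr
                simp only [List.mem_cons, List.not_mem_nil, or_false] at hpr
                rcases hpr with rfl <;>
                  exact ⟨pvKeyNe _ (by simp [pvKeysC]), (h4.2 _ (by simp [pvKeysC])).1⟩) u]
          rw [ih u hulen]
          simp [pvSel]
        · rw [pvChainStep (P1 := [(("(NORMALFORM)").toList, v1), (("(2A)").toList, v2), (("(2B)").toList, v3), (("(2C)").toList, v4)])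
            (P2 := [])
            (pairs := pvPairs v1 v2 v3 v4 v5) rfl (by decide)
            (by intro pr hpr
                simp only [List.mem_cons, List.not_mem_nil, or_false] at hpr
                rcases hpr with rfl | rfl | rfl | rfl <;>
                  exact ⟨pvKeyNe _ (by simp [pvKeysC]),
                    pvKeySep' _ (by simp [pvKeysC]) _ (by simp [pvKeysC]) (by simp)⟩)
            (by intro pr hpr; simp at hpr) u]
          rw [ih u hulen]
          simp [pvSel]

theorem pvJoinNilFlatten : ∀ parts : List (List Char), PySem.Chars.join [] parts = parts.flatten := by
  intro parts
  induction parts with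
  | nil => rfl
  | cons x rest ih =>
    cases rest with
    | nil => simp [PySem.Chars.join, List.intercalate]
    | cons y r =>
      simp only [PySem.Chars.join, List.intercalate] at ih ⊢
      simp [List.intersperse] at ih ⊢
      exact ih

theorem pvValCond {L : List String} (hmaster : ∀ v ∈ L.map String.toList, pvCondB v = true)
    (hlen : 0 < L.length) (i : Int) :
    pvCond (PySem.List.pyGetD L (PySem.Int.mod i (L.length : Int)) "").toList := by
  have hpos : (0 : Int) < (L.length : Int) := by exact_mod_cast hlen
  have h0 := PySem.Int.mod_nonneg i hpos
  have hlt := PySem.Int.mod_lt i hpos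
  rw [PySem.List.pyGetD_eq_getElem L "" h0 hlt]
  exact pvCondB_cond (hmaster _ (List.mem_map_of_mem (List.getElem_mem _)))

-- the closed-form value(key, i) of B equals A's list entry l[i % len(l)]
theorem pvVal1_eq (i : Int) : pvValue "(NORMALFORM)" i
    = PySem.List.pyGetD pvL1 (PySem.Int.mod i (pvL1.length : Int)) "" := by
  have hL : pvL1.length = 30 := by decide
  rw [hL, show ((30 : Nat) : Int) = (30 : Int) from rfl]
  have h0 := PySem.Int.mod_nonneg i (show (0:Int) < 30 by norm_num)
  have hlt := PySem.Int.mod_lt i (show (0:Int) < 30 by norm_num)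
  obtain ⟨m, hm, hmlt⟩ : ∃ m : Nat, PySem.Int.mod i 30 = (m : Int) ∧ m < 30 :=
    ⟨(PySem.Int.mod i 30).toNat, (Int.toNat_of_nonneg h0).symm, by omega⟩
  simp only [pvValue, hm]
  have key : ∀ m : Fin 30,
      ("x^2" ++ PySem.List.pyGetD pvAltB (PySem.Int.floordiv ((m.val : Nat) : Int) 5) "" ++ "x"
        ++ PySem.List.pyGetD pvAltC (PySem.Int.mod ((m.val : Nat) : Int) 5) "")
      = PySem.List.pyGetD pvL1 ((m.val : Nat) : Int) "" := by decide
  exact key ⟨m, hmlt⟩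

theorem pvVal2_eq (i : Int) : pvValue "(2A)" i
    = PySem.List.pyGetD pvL2 (PySem.Int.mod i (pvL2.length : Int)) "" := by
  have hL : pvL2.length = 15 := by decide
  rw [hL, show ((15 : Nat) : Int) = (15 : Int) from rfl]
  have h0 := PySem.Int.mod_nonneg i (show (0:Int) < 15 by norm_num)
  have hlt := PySem.Int.mod_lt i (show (0:Int) < 15 by norm_num)
  obtain ⟨m, hm, hmlt⟩ : ∃ m : Nat, PySem.Int.mod i 15 = (m : Int) ∧ m < 15 :=
    ⟨(PySem.Int.mod i 15).toNat, (Int.toNat_of_nonneg h0).symm, by omega⟩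
  simp only [pvValue, if_neg (by decide : ¬ ("(2A)" : String) = "(NORMALFORM)"), hm]
  have key : ∀ m : Fin 15,
      (pvChr "fgh" (PySem.Int.floordiv ((m.val : Nat) : Int) 5) ++ "'(x)="
        ++ PySem.List.pyGetD pvAltF (PySem.Int.mod ((m.val : Nat) : Int) 5) "")
      = PySem.List.pyGetD pvL2 ((m.val : Nat) : Int) "" := by decide
  exact key ⟨m, hmlt⟩

theorem pvVal3_eq (i : Int) : pvValue "(2B)" i
    = PySem.List.pyGetD pvL3 (PySem.Int.mod i (pvL3.length : Int)) "" := by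
  have hL : pvL3.length = 30 := by decide
  rw [hL, show ((30 : Nat) : Int) = (30 : Int) from rfl]
  have h0 := PySem.Int.mod_nonneg i (show (0:Int) < 30 by norm_num)
  have hlt := PySem.Int.mod_lt i (show (0:Int) < 30 by norm_num)
  obtain ⟨m, hm, hmlt⟩ : ∃ m : Nat, PySem.Int.mod i 30 = (m : Int) ∧ m < 30 :=
    ⟨(PySem.Int.mod i 30).toNat, (Int.toNat_of_nonneg h0).symm, by omega⟩
  simp only [pvValue, if_neg (by decide : ¬ ("(2B)" : String) = "(NORMALFORM)"),
    if_neg (by decide : ¬ ("(2B)" : String) = "(2A)"), hm]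
  have key : ∀ m : Fin 30,
      (pvChr "01" (PySem.Int.floordiv ((m.val : Nat) : Int) 15) ++ ","
        ++ pvChr "789" (PySem.Int.floordiv (PySem.Int.mod ((m.val : Nat) : Int) 15) 5)
        ++ "\\overline{" ++ pvChr "23456" (PySem.Int.mod ((m.val : Nat) : Int) 5) ++ "}")
      = PySem.List.pyGetD pvL3 ((m.val : Nat) : Int) "" := by decide
  exact key ⟨m, hmlt⟩

theorem pvVal4_eq (i : Int) : pvValue "(2C)" i
    = PySem.List.pyGetD pvL4 (PySem.Int.mod i (pvL4.length : Int)) "" := by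
  have hL : pvL4.length = 28 := by decide
  rw [hL, show ((28 : Nat) : Int) = (28 : Int) from rfl]
  have h0 := PySem.Int.mod_nonneg i (show (0:Int) < 28 by norm_num)
  have hlt := PySem.Int.mod_lt i (show (0:Int) < 28 by norm_num)
  obtain ⟨m, hm, hmlt⟩ : ∃ m : Nat, PySem.Int.mod i 28 = (m : Int) ∧ m < 28 :=
    ⟨(PySem.Int.mod i 28).toNat, (Int.toNat_of_nonneg h0).symm, by omega⟩
  simp only [pvValue, if_neg (by decide : ¬ ("(2C)" : String) = "(NORMALFORM)"),
    if_neg (by decide : ¬ ("(2C)" : String) = "(2A)"),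
    if_neg (by decide : ¬ ("(2C)" : String) = "(2B)"), hm]
  have key : ∀ m : Fin 28,
      (pvChr "xyabcni" (PySem.Int.floordiv ((m.val : Nat) : Int) 4) ++ "\\in\\mathbb{"
        ++ pvChr "NRQZ" (PySem.Int.mod ((m.val : Nat) : Int) 4) ++ "}")
      = PySem.List.pyGetD pvL4 ((m.val : Nat) : Int) "" := by decide
  exact key ⟨m, hmlt⟩

theorem pvVal5_eq (i : Int) : pvValue "(2D)" i
    = PySem.List.pyGetD pvL5 (PySem.Int.mod i (pvL5.length : Int)) "" := by
  have hL : pvL5.length = 27 := by decide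
  rw [hL, show ((27 : Nat) : Int) = (27 : Int) from rfl]
  have h0 := PySem.Int.mod_nonneg i (show (0:Int) < 27 by norm_num)
  have hlt := PySem.Int.mod_lt i (show (0:Int) < 27 by norm_num)
  obtain ⟨m, hm, hmlt⟩ : ∃ m : Nat, PySem.Int.mod i 27 = (m : Int) ∧ m < 27 :=
    ⟨(PySem.Int.mod i 27).toNat, (Int.toNat_of_nonneg h0).symm, by omega⟩
  simp only [pvValue, if_neg (by decide : ¬ ("(2D)" : String) = "(NORMALFORM)"),
    if_neg (by decide : ¬ ("(2D)" : String) = "(2A)"),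
    if_neg (by decide : ¬ ("(2D)" : String) = "(2B)"),
    if_neg (by decide : ¬ ("(2D)" : String) = "(2C)"), hm]
  have key : ∀ m : Fin 27,
      (pvChr "xyz" (PySem.Int.floordiv ((m.val : Nat) : Int) 9) ++ "\\neq-"
        ++ PySem.Int.toStr (1001 + PySem.Int.mod ((m.val : Nat) : Int) 9))
      = PySem.List.pyGetD pvL5 ((m.val : Nat) : Int) "" := by decide
  exact key ⟨m, hmlt⟩

-- the per-variant 5-entry dict looks up exactly value(key, i)
theorem pvImagesGet (i : Int) (k : String) (hk : k ∈ pvAltKeys) :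
    (pvAltKeys.foldl (fun d k' => d.insert k' (pvValue k' i)) PySem.Dict.empty).getD k ""
      = pvValue k i := by
  simp only [pvAltKeys, List.mem_cons, List.not_mem_nil, or_false] at hk
  rcases hk with rfl | rfl | rfl | rfl | rfl <;>
    simp [pvAltKeys, PySem.Dict.empty, PySem.Dict.insert, PySem.Dict.getD, PySem.Dict.get?]

-- ===== VERDICT (by name: the statement is the Claim_ definition above) =====
theorem variants_spec : Claim_equal_variants := by
  unfold Claim_equal_variants
  intro doc n _
  unfold Spec_variants variants variants_alt
  apply List.map_congr_left
  intro i hi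
  rw [show pvDict.keys = ["(NORMALFORM)", "(2A)", "(2B)", "(2C)", "(2D)"] from pvKeysDict]
  simp only [List.foldl_cons, List.foldl_nil, pvGetd1, pvGetd2, pvGetd3, pvGetd4, pvGetd5]
  apply String.toList_inj.mp
  simp only [PySem.Str.toList_replace, PySem.Str.toList_join]
  rw [show ("" : String).toList = ([] : List Char) from rfl, pvJoinNilFlatten, List.map_map]
  have hc1 := pvValCond pvMaster1 (by decide) i
  have hc2 := pvValCond pvMaster2 (by decide) i
  have hc3 := pvValCond pvMaster3 (by decide) i
  have hc4 := pvValCond pvMaster4 (by decide) i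
  have hc5 := pvValCond pvMaster5 (by decide) i
  have hmap : (pvTok doc.toList.length [] doc.toList).map
        (String.toList ∘ (fun tk : Bool × String =>
          if tk.1 then
            (pvAltKeys.foldl (fun d k => d.insert k (pvValue k i)) PySem.Dict.empty).getD tk.2 ""
          else tk.2))
      = (pvTok doc.toList.length [] doc.toList).map
        (fun tk => if tk.1 then
            pvSel (PySem.List.pyGetD pvL1 (PySem.Int.mod i (pvL1.length : Int)) "").toList
                  (PySem.List.pyGetD pvL2 (PySem.Int.mod i (pvL2.length : Int)) "").toList
                  (PySem.List.pyGetD pvL3 (PySem.Int.mod i (pvL3.length : Int)) "").toList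
                  (PySem.List.pyGetD pvL4 (PySem.Int.mod i (pvL4.length : Int)) "").toList
                  (PySem.List.pyGetD pvL5 (PySem.Int.mod i (pvL5.length : Int)) "").toList tk.2
          else tk.2.toList) := by
    apply List.map_congr_left
    intro tk htk
    cases hb : tk.1 with
    | false => simp [hb]
    | true =>
      have hkm := pvTokKeys _ _ _ tk htk hb
      have hIm := pvImagesGet i tk.2 hkm
      simp only [pvAltKeys, List.mem_cons, List.not_mem_nil, or_false] at hkm
      rcases hkm with h | h | h | h | h <;> rw [h] at hIm <;>
        simp [hb, h, hIm, pvVal1_eq, pvVal2_eq, pvVal3_eq, pvVal4_eq, pvVal5_eq, pvSel]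
  rw [hmap]
  have := pvMain _ _ _ _ _ hc1 hc2 hc3 hc4 hc5 doc.toList.length doc.toList (le_refl _)
  simp only [pvPairs, pvRepF, List.foldl_cons, List.foldl_nil] at this
  exact this
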